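-- pv_equiv track=rewrite | github.com/jsadlocha/Advent-Of-Code | Day17/solution.py | drawBrick
-- ===== SOURCE A (Python) =====
-- start_col = 2
--
-- def drawBrick(brick, brick_size):
--   s = []
--   for row in range(brick_size-1, -1, -1):
--     rs = ''
--     for col in range(0, 7):
--       if (row, col-start_col) in brick:
--         rs += '@'
--       else:
--         rs += '.'
--     s.append(rs)
--   return s
-- ===== SOURCE B (Python) =====
-- start_col = 2
--
-- def drawBrick(brick, brick_size):
--   rows = [['.'] * 7 for _ in range(brick_size)]
--   for r, c in brick:
--     if 0 <= r < brick_size and 0 <= c + start_col < 7: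
--       rows[brick_size - 1 - r][c + start_col] = '@'
--   return [''.join(row) for row in rows]
-- ===== Notes on version B (the rewrite author's own statement) =====
-- stated objective: faster
-- what changed: B scatters: it allocates brick_size dot-filled row buffers once and sets '@' only at each in-window brick cell, instead of A's gather that scans the whole brick list for every one of the 7*brick_size grid cells.
import Mathlib
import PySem

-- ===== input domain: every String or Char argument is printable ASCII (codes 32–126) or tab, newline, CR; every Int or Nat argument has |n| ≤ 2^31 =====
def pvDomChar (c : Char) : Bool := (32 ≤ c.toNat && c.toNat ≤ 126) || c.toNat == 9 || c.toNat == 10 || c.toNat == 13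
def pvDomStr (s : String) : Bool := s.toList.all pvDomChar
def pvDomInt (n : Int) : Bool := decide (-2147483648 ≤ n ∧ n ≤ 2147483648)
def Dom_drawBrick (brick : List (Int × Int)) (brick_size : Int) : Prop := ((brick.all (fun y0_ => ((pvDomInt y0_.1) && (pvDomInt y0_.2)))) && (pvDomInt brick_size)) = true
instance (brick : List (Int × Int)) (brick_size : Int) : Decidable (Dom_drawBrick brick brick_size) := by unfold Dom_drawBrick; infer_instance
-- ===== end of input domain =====

-- B builds the 7-wide grid once and writes '@' only at each in-window brick cell (scatter),
-- instead of A's per-cell scan of the whole brick list (gather).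

-- ===== PORT A =====
-- for row in range(brick_size-1,-1,-1): rs = ''; for col in range(0,7): rs += '@' if (row,col-2) in brick else '.'; s.append(rs)
def drawBrick (brick : List (Int × Int)) (brick_size : Int) : List String :=
  (PySem.List.pyRange (brick_size - 1) (-1) (-1)).foldl (fun s row =>
    s ++ [String.mk ((PySem.List.pyRange 0 7 1).foldl (fun rs col =>
      rs ++ (if brick.contains (row, col - 2) then ['@'] else ['.'])) ([] : List Char))]) []

-- ===== PORT B =====
-- rows = [['.']*7 for _ in range(brick_size)]; in-window writes rows[brick_size-1-r][c+2]='@'; join each row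
def drawBrick_alt (brick : List (Int × Int)) (brick_size : Int) : List String :=
  (brick.foldl (fun g rc =>
      if 0 ≤ rc.1 ∧ rc.1 < brick_size ∧ 0 ≤ rc.2 + 2 ∧ rc.2 + 2 < 7 then
        g.modify (brick_size - 1 - rc.1).toNat (fun row => row.set (rc.2 + 2).toNat '@')
      else g)
    ((PySem.List.pyRange 0 brick_size 1).map (fun _ => List.replicate 7 '.'))).map String.mk

-- ===== PRECONDITION & SPEC =====
def Spec_drawBrick (brick : List (Int × Int)) (brick_size : Int) (out : List String) : Prop := out = drawBrick_alt brick brick_size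
instance (brick : List (Int × Int)) (brick_size : Int) (out : List String) : Decidable (Spec_drawBrick brick brick_size out) := by unfold Spec_drawBrick; infer_instance

-- ===== CLAIM (what is proved, stated in full; the proofs are below) =====
def Claim_equal_drawBrick : Prop := ∀ (brick : List (Int × Int)) (brick_size : Int), Dom_drawBrick brick brick_size → Spec_drawBrick brick brick_size (drawBrick brick brick_size)

-- ===== LEMMAS AND PROOFS =====

-- the characters of one rendered row of A, for a given brick row value
def pvRowChars (brick : List (Int × Int)) (row : Int) : List Char :=
  (List.range 7).map (fun j : Nat => if brick.contains (row, (j : Int) - 2) then '@' else '.')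

-- step function of B's fold (definitionally the lambda in drawBrick_alt)
def pvStep (brick_size : Int) (g : List (List Char)) (rc : Int × Int) : List (List Char) :=
  if 0 ≤ rc.1 ∧ rc.1 < brick_size ∧ 0 ≤ rc.2 + 2 ∧ rc.2 + 2 < 7 then
    g.modify (brick_size - 1 - rc.1).toNat (fun row => row.set (rc.2 + 2).toNat '@')
  else g

-- B's fold restricted to a single row index k
def pvRowStep (bs : Int) (k : Nat) (row : List Char) (rc : Int × Int) : List Char :=
  if (0 ≤ rc.1 ∧ rc.1 < bs ∧ 0 ≤ rc.2 + 2 ∧ rc.2 + 2 < 7) ∧ (bs - 1 - rc.1).toNat = k then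
    row.set (rc.2 + 2).toNat '@'
  else row

lemma pvFlattenSingleton {α β : Type} (f : α → β) (l : List α) :
    (l.map (fun y => [f y])).flatten = l.map f := by
  induction l with
  | nil => rfl
  | cons x t ih => simp [ih]

lemma pvAlt_eq (brick : List (Int × Int)) (bs : Int) :
    drawBrick_alt brick bs =
      (brick.foldl (pvStep bs)
        ((PySem.List.pyRange 0 bs 1).map (fun _ => List.replicate 7 '.'))).map String.mk := rfl

lemma pvScatter_length (bs : Int) (brick : List (Int × Int)) (g : List (List Char)) :
    (brick.foldl (pvStep bs) g).length = g.length := by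
  induction brick generalizing g with
  | nil => rfl
  | cons rc l ih =>
      rw [List.foldl_cons, ih]
      simp only [pvStep]; split <;> simp

lemma pvRowFold_length (bs : Int) (k : Nat) (l : List (Int × Int)) (row : List Char) :
    (l.foldl (pvRowStep bs k) row).length = row.length := by
  induction l generalizing row with
  | nil => rfl
  | cons rc t ih =>
      rw [List.foldl_cons, ih]
      simp only [pvRowStep]; split <;> simp

lemma pvScatter_row (bs : Int) (brick : List (Int × Int)) (g : List (List Char)) (k : Nat)
    (hk : k < g.length) :
    (brick.foldl (pvStep bs) g)[k]'(by rw [pvScatter_length]; exact hk) =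
      brick.foldl (pvRowStep bs k) (g[k]'hk) := by
  induction brick generalizing g with
  | nil => rfl
  | cons rc l ih =>
      simp only [List.foldl_cons]
      have hk' : k < (pvStep bs g rc).length := by
        simp only [pvStep]; split <;> simp [hk]
      have hstep : (pvStep bs g rc)[k]'hk' = pvRowStep bs k (g[k]'hk) rc := by
        simp only [pvStep, pvRowStep]
        by_cases hb : 0 ≤ rc.1 ∧ rc.1 < bs ∧ 0 ≤ rc.2 + 2 ∧ rc.2 + 2 < 7
        · simp only [if_pos hb, List.getElem_modify]
          by_cases he : (bs - 1 - rc.1).toNat = k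
          · simp only [if_pos he, if_pos (And.intro hb he)]
          · simp only [if_neg he, if_neg (fun h : _ ∧ _ => he h.2)]
        · simp only [if_neg hb, if_neg (fun h : _ ∧ _ => hb h.1)]
      rw [ih (pvStep bs g rc) hk', hstep]

lemma pvRowFold_cell (bs : Int) (k : Nat) (brick : List (Int × Int)) (row : List Char) (j : Nat)
    (hj : j < row.length) :
    (brick.foldl (pvRowStep bs k) row)[j]'(by rw [pvRowFold_length]; exact hj) =
      if brick.any (fun rc =>
          decide ((0 ≤ rc.1 ∧ rc.1 < bs ∧ 0 ≤ rc.2 + 2 ∧ rc.2 + 2 < 7) ∧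
            (bs - 1 - rc.1).toNat = k ∧ (rc.2 + 2).toNat = j))
      then '@' else row[j]'hj := by
  induction brick generalizing row with
  | nil => simp
  | cons rc l ih =>
      simp only [List.foldl_cons, List.any_cons]
      have hj' : j < (pvRowStep bs k row rc).length := by
        simp only [pvRowStep]; split <;> simp [hj]
      rw [ih (pvRowStep bs k row rc) hj']
      by_cases hhit : (0 ≤ rc.1 ∧ rc.1 < bs ∧ 0 ≤ rc.2 + 2 ∧ rc.2 + 2 < 7) ∧
          (bs - 1 - rc.1).toNat = k ∧ (rc.2 + 2).toNat = j
      · have hcell : (pvRowStep bs k row rc)[j]'hj' = '@' := by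
          simp only [pvRowStep]
          simp only [if_pos (And.intro hhit.1 hhit.2.1), List.getElem_set,
            if_pos hhit.2.2]
        rw [hcell]
        simp only [decide_eq_true hhit]
        simp
      · have hcell : (pvRowStep bs k row rc)[j]'hj' = row[j]'hj := by
          simp only [pvRowStep]
          by_cases hc : (0 ≤ rc.1 ∧ rc.1 < bs ∧ 0 ≤ rc.2 + 2 ∧ rc.2 + 2 < 7) ∧
              (bs - 1 - rc.1).toNat = k
          · simp only [if_pos hc, List.getElem_set,
              if_neg (fun h => hhit ⟨hc.1, hc.2, h⟩)]
          · simp only [if_neg hc]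
        rw [hcell]
        simp only [decide_eq_false hhit, Bool.false_or]

-- the scatter hit-test equals A's membership test, at valid grid coordinates
lemma pvHit_eq_contains (bs : Int) (brick : List (Int × Int)) (k j : Nat)
    (hk : k < bs.toNat) (hj : j < 7) :
    brick.any (fun rc =>
        decide ((0 ≤ rc.1 ∧ rc.1 < bs ∧ 0 ≤ rc.2 + 2 ∧ rc.2 + 2 < 7) ∧
          (bs - 1 - rc.1).toNat = k ∧ (rc.2 + 2).toNat = j)) =
      brick.contains (bs - 1 - (k : Int), (j : Int) - 2) := by
  rw [List.contains_eq_any_beq]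
  congr 1
  funext rc
  rw [Bool.eq_iff_iff]
  simp only [decide_eq_true_eq, beq_iff_eq, Prod.ext_iff]
  omega

-- A's inner loop over the seven columns
lemma pvInner_eq (brick : List (Int × Int)) (row : Int) :
    (PySem.List.pyRange 0 7 1).foldl (fun rs col =>
        rs ++ (if brick.contains (row, col - 2) then ['@'] else ['.'])) ([] : List Char) =
      pvRowChars brick row := by
  rw [PySem.List.foldl_append_eq_flatMap, List.nil_append]
  have hsing : ∀ col : Int,
      (if brick.contains (row, col - 2) then ['@'] else ['.']) =
        [if brick.contains (row, col - 2) then '@' else '.'] :=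
    fun col => (apply_ite (fun x => [x]) _ '@' '.').symm
  simp only [hsing]
  rw [PySem.List.pyRange_one]
  simp [pvRowChars, List.flatMap_def, Function.comp_def]
  exact pvFlattenSingleton _ _

-- A's outer loop: rows listed for row = bs-1 down to 0
lemma pvA_eq (brick : List (Int × Int)) (bs : Int) :
    drawBrick brick bs =
      (List.range bs.toNat).map (fun k : Nat => String.mk (pvRowChars brick (bs - 1 - (k : Int)))) := by
  unfold drawBrick
  rw [PySem.List.pyRange_neg_one]
  have h : (bs - 1 - -1).toNat = bs.toNat := by omega
  rw [h, List.foldl_map, PySem.List.foldl_append_eq_flatMap, List.nil_append]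
  simp only [pvInner_eq]
  simp only [List.flatMap_def, Function.comp_def]
  exact pvFlattenSingleton (fun k : Nat => String.mk (pvRowChars brick (bs - 1 - (k : Int)))) _

-- ===== VERDICT (by name: the statement is the Claim_ definition above) =====
theorem drawBrick_spec : Claim_equal_drawBrick := by
  intro brick bs _
  unfold Spec_drawBrick
  rw [pvAlt_eq, pvA_eq]
  have hlen0 : ((PySem.List.pyRange 0 bs 1).map
      (fun _ => List.replicate 7 ('.' : Char))).length = bs.toNat := by
    simp [PySem.List.length_pyRange_one]
  apply List.ext_getElem
  · simp [pvScatter_length, hlen0]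
  · intro k hk1 hk2
    have hk : k < bs.toNat := by simpa using hk1
    have hkg : k < ((PySem.List.pyRange 0 bs 1).map
        (fun _ => List.replicate 7 ('.' : Char))).length := by omega
    simp only [List.getElem_map, List.getElem_range]
    rw [pvScatter_row bs brick _ k hkg]
    congr 1
    have hrow : ((PySem.List.pyRange 0 bs 1).map
        (fun _ => List.replicate 7 ('.' : Char)))[k]'hkg = List.replicate 7 '.' := by
      simp
    rw [hrow]
    apply List.ext_getElem
    · simp [pvRowChars, pvRowFold_length]
    · intro j hj1 hj2
      have hj : j < 7 := by simpa [pvRowChars] using hj1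
      have hjr : j < (List.replicate 7 ('.' : Char)).length := by simp [hj]
      rw [pvRowFold_cell bs k brick _ j hjr, pvHit_eq_contains bs brick k j hk hj]
      simp only [pvRowChars, List.getElem_map, List.getElem_range, List.getElem_replicate]
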